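-- pv_equiv track=rewrite | github.com/DonDubstep/DonDubstep-Course-work-ST | my_package/code_Cyclic.py | encode_loop
-- ===== SOURCE A (Python) =====
-- from copy import copy
--
-- CHUNK_LENGTH = 4
--
-- def chars_to_bin(chars):
--     """
--     Преобразование символов в бинарный формат
--     #ord - преобразование в int
--     #bin - преобразование в 2сс
--     #zfill - заполнение нулями
--     """
--     return ''.join([bin(ord(c))[2:].zfill(8) for c in chars])
--
-- def chunk_iterator(text_bin, chunk_size=CHUNK_LENGTH):
--     """
--     Поблочный вывод бинарных данных
--     """
--     for i in range(len(text_bin)):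
--         if not i % chunk_size:
--             yield text_bin[i:i + chunk_size]
--
-- def division(code, g):
--     part = code[:len(g)]
--     for k in range(len(code) - len(g) + 1):
--         part = del_zeros(part)
--         if len(part) < len(g) and (k == (len(code) - len(g))):
--             break
--         if len(part) < len(g):
--             part.append(code[k + len(g)])
--             continue
--         mod = []
--         for i in range(1, len(g)):
--             if part[i] == g[i]:
--                 mod.append(0)
--             else:
--                 mod.append(1)
--         if k != (len(code) - len(g)):
--             mod.append(code[k + len(g)])
--         part = copy(mod)
--     return part
--
-- def encode_loop(source):
--     text_bin = chars_to_bin(source)#получаем из исходных данных, str типа '01011... '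
--     result = ''
--
--     for chunk_bin in chunk_iterator(text_bin, 4):#перебираем чанки
--         code = [0 if i=='0' else 1 for i in chunk_bin]#chunk_bin преобразуем в list int типа [0,1,0,0,1 ...]
--         zeros = [0 for i in range(3)]
--         code.extend(zeros)
--         g = [1, 0, 1, 1]
--         mod = division(code, g)
--         while len(mod) < len(g) - 1:
--             mod.insert(0, 0)
--         del code[4:]
--         code.extend(mod)
--         result += ''.join(['0' if i==0 else '1' for i in code])
--     return result
--
-- def del_zeros(lst):
--     for i in range(len(lst)):
--         if lst[i] == 1:
--             return lst[i:]
--     return [0]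
-- ===== SOURCE B (Python) =====
-- def encode_loop(source):
--     # Hamming(7,4)/CRC g=x^3+x+1 parity in closed form per nibble, no polynomial-division loop.
--     out = []
--     for ch in source:
--         byte = ord(ch)
--         for nib in (byte >> 4, byte & 0xF):
--             d3 = (nib >> 3) & 1
--             d2 = (nib >> 2) & 1
--             d1 = (nib >> 1) & 1
--             d0 = nib & 1
--             out.append(f"{d3}{d2}{d1}{d0}{d3 ^ d2 ^ d1}{d2 ^ d1 ^ d0}{d3 ^ d2 ^ d0}")
--     return ''.join(out)
-- ===== Notes on version B (the rewrite author's own statement) =====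
-- stated objective: simpler
-- what changed: Replaced the iterative polynomial-division loop (division/del_zeros with shifting, padding and list surgery) by a closed-form per-nibble computation: each 4-bit chunk's three CRC parity bits for g=x^3+x+1 are fixed XOR combinations of its data bits, emitted directly.
import Mathlib
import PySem

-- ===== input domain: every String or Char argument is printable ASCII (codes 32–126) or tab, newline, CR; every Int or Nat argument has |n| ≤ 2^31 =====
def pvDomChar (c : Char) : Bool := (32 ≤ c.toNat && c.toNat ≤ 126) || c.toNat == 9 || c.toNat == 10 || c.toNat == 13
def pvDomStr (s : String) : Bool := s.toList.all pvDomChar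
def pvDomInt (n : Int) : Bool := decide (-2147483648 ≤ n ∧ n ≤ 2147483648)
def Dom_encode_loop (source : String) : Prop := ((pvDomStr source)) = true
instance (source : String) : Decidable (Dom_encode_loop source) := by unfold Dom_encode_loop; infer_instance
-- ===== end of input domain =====

-- B replaces A's iterative CRC polynomial-division loop by the closed-form XOR parity bits of each 4-bit chunk (objective: simpler).


-- ===== PORT A =====
-- bin(ord(c))[2:].zfill(8)  (toBinChars = format(n,'b') = bin(n)[2:] for n ≥ 0)
def pvZfill8 (l : List Char) : List Char := List.replicate (8 - l.length) '0' ++ l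

def pvCharsToBin (cs : List Char) : List Char :=
  (cs.map (fun c => pvZfill8 (PySem.Int.toBinChars (c.toNat : Int)))).flatten

-- chunk_iterator: for i in range(len(text_bin)): if not i % 4: yield text_bin[i:i+4]
-- (the slice indices are nonnegative here, so drop/take is exact for the Python slice)
def pvChunkIter (l : List Char) : List (List Char) :=
  (List.range l.length).filterMap
    (fun i => if i % 4 = 0 then some ((l.drop i).take 4) else none)

def pvDelZeros : List Int → List Int
  | [] => [0]
  | x :: xs => if x = 1 then x :: xs else pvDelZeros xs

-- division's k-loop; every index code[k+len(g)] taken in A's runs is in range, so getD's default is never used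
def pvDivisionGo (code g : List Int) : List Int → List Nat → List Int
  | part, [] => part
  | part, k :: rest =>
    let part := pvDelZeros part
    if part.length < g.length ∧ k = code.length - g.length then part
    else if part.length < g.length then
      pvDivisionGo code g (part ++ [code.getD (k + g.length) 0]) rest
    else
      let m := (List.range (g.length - 1)).map
        (fun i => if part.getD (i + 1) 0 = g.getD (i + 1) 0 then (0 : Int) else 1)
      let m := if k ≠ code.length - g.length then m ++ [code.getD (k + g.length) 0] else m
      pvDivisionGo code g m rest

def pvDivision (code g : List Int) : List Int :=
  pvDivisionGo code g (code.take g.length) (List.range (code.length - g.length + 1))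

-- while len(mod) < len(g) - 1: mod.insert(0, 0); each pass grows m by one,
-- so the loop runs at most glen - 1 times and the fuel glen is never exhausted: exact.
def pvPadModF (glen : Nat) : Nat → List Int → List Int
  | 0, m => m
  | fuel + 1, m => if m.length < glen - 1 then pvPadModF glen fuel (0 :: m) else m

def pvPadMod (glen : Nat) (m : List Int) : List Int := pvPadModF glen glen m

def pvPerChunk (chunk : List Char) : List Char :=
  let code := chunk.map (fun ch => if ch = '0' then (0 : Int) else 1)
  let code := code ++ (List.range 3).map (fun _ => (0 : Int))
  let g : List Int := [1, 0, 1, 1]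
  let m := pvPadMod g.length (pvDivision code g)
  let code := code.take 4 ++ m
  code.map (fun i => if i = 0 then '0' else '1')

def encode_loop (source : String) : String :=
  String.ofList ((pvChunkIter (pvCharsToBin source.toList)).foldl
    (fun acc chunk => acc ++ pvPerChunk chunk) [])

-- ===== PORT B =====
def pvBitChar (n : Nat) : Char := if n = 0 then '0' else '1'

def pvPerNib (nib : Nat) : List Char :=
  let d3 := (nib >>> 3) &&& 1
  let d2 := (nib >>> 2) &&& 1
  let d1 := (nib >>> 1) &&& 1
  let d0 := nib &&& 1
  [pvBitChar d3, pvBitChar d2, pvBitChar d1, pvBitChar d0,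
   pvBitChar (d3 ^^^ d2 ^^^ d1), pvBitChar (d2 ^^^ d1 ^^^ d0), pvBitChar (d3 ^^^ d2 ^^^ d0)]

def pvPerCharB (c : Char) : List Char :=
  [c.toNat >>> 4, c.toNat &&& 15].flatMap pvPerNib

def encode_loop_alt (source : String) : String :=
  String.ofList (source.toList.flatMap pvPerCharB)

-- ===== PRECONDITION & SPEC =====
def Spec_encode_loop (source : String) (out : String) : Prop := out = encode_loop_alt source
instance (source : String) (out : String) : Decidable (Spec_encode_loop source out) := by unfold Spec_encode_loop; infer_instance

-- ===== CLAIM (what is proved, stated in full; the proofs are below) =====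
def Claim_equal_encode_loop : Prop := ∀ (source : String), Dom_encode_loop source → Spec_encode_loop source (encode_loop source)

-- ===== LEMMAS AND PROOFS =====
def pvBin8 (n : Nat) : List Char := pvZfill8 (PySem.Int.toBinChars (n : Int))

-- per-character agreement of the two pipelines, checked on all 127 Dom-reachable codes
theorem pv_perChar (n : Nat) (h : n < 127) :
    (pvBin8 n).length = 8 ∧
    pvPerChunk ((pvBin8 n).take 4) ++ pvPerChunk ((pvBin8 n).drop 4)
      = [n >>> 4, n &&& 15].flatMap pvPerNib := by
  revert n h; decide

theorem pv_chunkIter_cons (x rest : List Char) (hx : x.length = 4) :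
    pvChunkIter (x ++ rest) = x :: pvChunkIter rest := by
  unfold pvChunkIter
  rw [List.length_append, hx, List.range_add, List.filterMap_append, List.filterMap_map]
  have h1 : (List.range 4).filterMap
      (fun i => if i % 4 = 0 then some (((x ++ rest).drop i).take 4) else none)
      = [(x ++ rest).take 4] := by
    simp [List.range_succ]
  rw [h1, List.take_left' hx, List.singleton_append]
  congr 1
  apply List.filterMap_congr
  intro j _
  simp only [Function.comp_apply, Nat.add_mod_left]
  by_cases h : j % 4 = 0
  · simp only [if_pos h]
    congr 2
    rw [← hx, List.drop_append]
    simp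
  · simp [h]

theorem pv_main_aux : ∀ cs : List Char, (∀ c ∈ cs, c.toNat < 127) →
    (pvChunkIter (pvCharsToBin cs)).flatMap pvPerChunk = cs.flatMap pvPerCharB := by
  intro cs
  induction cs with
  | nil => intro _; simp [pvCharsToBin, pvChunkIter]
  | cons c cs ih =>
    intro h
    obtain ⟨hlen, heq⟩ := pv_perChar c.toNat (h c (List.mem_cons_self ..))
    have hbin : pvCharsToBin (c :: cs) = pvBin8 c.toNat ++ pvCharsToBin cs := by
      simp [pvCharsToBin, pvBin8]
    have ht : ((pvBin8 c.toNat).take 4).length = 4 := by simp [List.length_take, hlen]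
    have hd : ((pvBin8 c.toNat).drop 4).length = 4 := by simp [List.length_drop, hlen]
    rw [hbin, ← List.take_append_drop 4 (pvBin8 c.toNat), List.append_assoc,
        pv_chunkIter_cons _ _ ht, pv_chunkIter_cons _ _ hd]
    simp only [List.flatMap_cons]
    rw [ih (fun d hd' => h d (List.mem_cons_of_mem _ hd')), ← List.append_assoc, heq]
    rfl

theorem pv_main (cs : List Char) (h : ∀ c ∈ cs, c.toNat < 127) :
    (pvChunkIter (pvCharsToBin cs)).foldl (fun acc chunk => acc ++ pvPerChunk chunk) []
      = cs.flatMap pvPerCharB := by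
  rw [PySem.List.foldl_append_eq_flatMap, List.nil_append]
  exact pv_main_aux cs h

-- ===== VERDICT (by name: the statement is the Claim_ definition above) =====
theorem encode_loop_spec : Claim_equal_encode_loop := by
  intro source hdom
  unfold Spec_encode_loop encode_loop encode_loop_alt
  congr 1
  apply pv_main
  intro c hc
  have := (List.all_eq_true.mp hdom) c hc
  simp [pvDomChar] at this
  omega
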